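-- pv_equiv track=rewrite | github.com/furkan-kalabalik/CSE321-Algorithms-HW | SpecialArray.py | getLeftMostMin
-- ===== SOURCE A (Python) =====
-- def getLeftMostMin(arr):
--     min = arr[0]
--     minIndex = 0
--     for i in range(1, len(arr)):
--         if(arr[i] < min):
--             min = arr[i]
--             minIndex = i
--     return minIndex
-- ===== SOURCE B (Python) =====
-- def getLeftMostMin(arr):
--     return arr.index(min(arr))
-- ===== Notes on version B (the rewrite author's own statement) =====
-- stated objective: idiomatic
-- what changed: Replaces the manual index loop tracking a running (min, minIndex) pair with the built-in min() followed by list.index(), whose first-match semantics reproduces A's leftmost tie-breaking.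
import Mathlib
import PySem

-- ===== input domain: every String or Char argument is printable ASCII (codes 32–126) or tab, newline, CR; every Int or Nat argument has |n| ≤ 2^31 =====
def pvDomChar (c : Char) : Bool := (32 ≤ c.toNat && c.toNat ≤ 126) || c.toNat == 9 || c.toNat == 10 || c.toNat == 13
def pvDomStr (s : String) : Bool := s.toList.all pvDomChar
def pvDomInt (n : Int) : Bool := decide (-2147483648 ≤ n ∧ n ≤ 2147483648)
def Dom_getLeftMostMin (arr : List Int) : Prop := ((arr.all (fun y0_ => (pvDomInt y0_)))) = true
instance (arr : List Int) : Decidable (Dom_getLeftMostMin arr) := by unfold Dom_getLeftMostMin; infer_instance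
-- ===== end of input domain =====

-- B replaces A's manual running-(min, minIndex) loop with min() + list.index() (idiomatic; same behaviour incl. leftmost tie-breaking).

-- ===== PORT A =====
def getLeftMostMin (arr : List Int) : Int :=
  let min0 := PySem.List.pyGetD arr 0 0          -- arr[0]; Pre_ excludes arr = [] where Python raises IndexError
  let st := (PySem.List.pyRange 1 (PySem.List.len arr) 1).foldl
    (fun (s : Int × Int) i =>
      if PySem.List.pyGetD arr i 0 < s.1 then (PySem.List.pyGetD arr i 0, i) else s)
    (min0, 0)
  st.2

-- ===== PORT B =====
def getLeftMostMin_alt (arr : List Int) : Int :=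
  match PySem.List.min? arr (fun x => x) with    -- min(arr); none only for arr = []
  | none => 0
  | some m => ((PySem.List.index? arr m).getD 0 : Nat)

-- ===== PRECONDITION & SPEC =====
-- Pre_ excludes exactly the empty list, on which Python A raises IndexError (arr[0]).
def Pre_getLeftMostMin (arr : List Int) : Prop := arr ≠ []
instance (arr : List Int) : Decidable (Pre_getLeftMostMin arr) := by unfold Pre_getLeftMostMin; infer_instance
def pvWitness_getLeftMostMin : List Int := [3, 1, 2, 1]

def Spec_getLeftMostMin (arr : List Int) (out : Int) : Prop := out = getLeftMostMin_alt arr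
instance (arr : List Int) (out : Int) : Decidable (Spec_getLeftMostMin arr out) := by unfold Spec_getLeftMostMin; infer_instance

-- ===== CLAIM (what is proved, stated in full; the proofs are below) =====
def Claim_equal_getLeftMostMin : Prop := ∀ (arr : List Int), Dom_getLeftMostMin arr → Pre_getLeftMostMin arr → Spec_getLeftMostMin arr (getLeftMostMin arr)

-- ===== LEMMAS AND PROOFS =====

-- The fold over the enumerated tail computes (overall min, position of its first occurrence).
theorem pv_fold_enum (t : List Int) (j m k : Int) :
    (PySem.List.enumerate t j).foldl
      (fun (s : Int × Int) (p : Int × Int) => if p.2 < s.1 then (p.2, p.1) else s) (m, k)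
    = if t.foldl min m < m then
        (t.foldl min m, j + ((PySem.List.index? t (t.foldl min m)).getD 0 : Int))
      else (m, k) := by
  induction t generalizing j m k with
  | nil => simp [PySem.List.enumerate]
  | cons a t ih =>
    have hmem := PySem.List.foldl_min_mem (t := t)
    by_cases ha : a < m
    · have hma : min m a = a := min_eq_right ha.le
      rw [PySem.List.enumerate_cons]
      simp only [List.foldl_cons, if_pos ha, hma]
      rw [ih]
      by_cases hta : t.foldl min a < a
      · have hmem' : t.foldl min a ∈ t := by
          rcases hmem a with h | h
          · omega
          · exact h
        have hne : a ≠ t.foldl min a := by omega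
        have hidx : ∃ n, PySem.List.index? t (t.foldl min a) = some n := by
          cases h : PySem.List.index? t (t.foldl min a) with
          | none => exact absurd ((PySem.List.index?_eq_none_iff t _).1 h) (by simp [hmem'])
          | some n => exact ⟨n, rfl⟩
        rcases hidx with ⟨n, hn⟩
        rw [if_pos hta, if_pos (by omega)]
        rw [PySem.List.index?_cons_of_ne _ hne, hn]
        simp
        omega
      · rw [if_neg hta]
        have hle : t.foldl min a ≤ a := (PySem.List.foldl_min_le t a).1
        have heq : t.foldl min a = a := by omega
        rw [heq, if_pos ha, PySem.List.index?_cons_self]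
        simp
    · have hmm : min m a = m := min_eq_left (by omega)
      rw [PySem.List.enumerate_cons]
      simp only [List.foldl_cons, if_neg ha, hmm]
      rw [ih]
      by_cases htm : t.foldl min m < m
      · have hmem' : t.foldl min m ∈ t := by
          rcases hmem m with h | h
          · omega
          · exact h
        have hne : a ≠ t.foldl min m := by omega
        have hidx : ∃ n, PySem.List.index? t (t.foldl min m) = some n := by
          cases h : PySem.List.index? t (t.foldl min m) with
          | none => exact absurd ((PySem.List.index?_eq_none_iff t _).1 h) (by simp [hmem'])
          | some n => exact ⟨n, rfl⟩
        rcases hidx with ⟨n, hn⟩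
        rw [if_pos htm, if_pos htm]
        rw [PySem.List.index?_cons_of_ne _ hne, hn]
        simp
        omega
      · rw [if_neg htm, if_neg htm]

-- ===== VERDICT (by name: the statement is the Claim_ definition above) =====
theorem getLeftMostMin_spec : Claim_equal_getLeftMostMin := by
  intro arr _ hpre
  unfold Spec_getLeftMostMin getLeftMostMin getLeftMostMin_alt
  cases arr with
  | nil => exact absurd rfl hpre
  | cons a t =>
    dsimp only
    -- turn A's index fold into a fold over the enumeration of the whole list
    have hlen : PySem.List.len (a :: t) = (1 : Int) + t.length := by
      simp [PySem.List.len]; omega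
    have hrange : PySem.List.pyRange 0 (PySem.List.len (a :: t)) 1
        = 0 :: PySem.List.pyRange 1 (PySem.List.len (a :: t)) 1 := by
      apply PySem.List.pyRange_one_cons
      rw [hlen]; omega
    have hstep0 : ∀ s : Int × Int, s.1 = a →
        (if PySem.List.pyGetD (a :: t) 0 0 < s.1 then (PySem.List.pyGetD (a :: t) 0 0, (0:Int)) else s) = s := by
      intro s hs
      simp [PySem.List.pyGetD, PySem.List.pyGet?, PySem.List.pyIdx?, hs]
    have hA : (PySem.List.pyRange 1 (PySem.List.len (a :: t)) 1).foldl
        (fun (s : Int × Int) i =>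
          if PySem.List.pyGetD (a :: t) i 0 < s.1 then (PySem.List.pyGetD (a :: t) i 0, i) else s)
        (PySem.List.pyGetD (a :: t) 0 0, 0)
        = (PySem.List.pyRange 0 (PySem.List.len (a :: t)) 1).foldl
        (fun (s : Int × Int) i =>
          if PySem.List.pyGetD (a :: t) i 0 < s.1 then (PySem.List.pyGetD (a :: t) i 0, i) else s)
        (PySem.List.pyGetD (a :: t) 0 0, 0) := by
      rw [hrange, List.foldl_cons]
      congr 1
      exact (hstep0 (PySem.List.pyGetD (a :: t) 0 0, 0) (by show PySem.List.pyGetD (a :: t) 0 0 = a; simp)).symm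
    rw [hA]
    have henum := PySem.List.enumerate_eq_map_pyRange (xs := (a :: t)) (d := 0)
    rw [show PySem.List.pyRange 0 (PySem.List.len (a :: t)) 1
          = (PySem.List.enumerate (a :: t) 0).map (·.1) from by
        rw [henum, List.map_map]
        rw [show ((fun (x : Int × Int) => x.1) ∘ fun j => (j, PySem.List.pyGetD (a :: t) j 0)) = id from rfl]
        rw [List.map_id]]
    rw [List.foldl_map]
    have hval : ∀ p ∈ PySem.List.enumerate (a :: t) 0,
        PySem.List.pyGetD (a :: t) p.1 0 = p.2 := by
      intro p hp
      rw [henum] at hp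
      rcases List.mem_map.1 hp with ⟨j, hj, rfl⟩
      rfl
    rw [PySem.List.foldl_congr_mem (PySem.List.enumerate (a :: t)) _
        (fun (s : Int × Int) (p : Int × Int) => if p.2 < s.1 then (p.2, p.1) else s) _
        (by intro s p hp; rw [hval p hp])]
    have hget0 : PySem.List.pyGetD (a :: t) 0 0 = a := by
      simp [PySem.List.pyGetD, PySem.List.pyGet?, PySem.List.pyIdx?]
    rw [hget0, pv_fold_enum]
    rw [PySem.List.min?_id_cons]
    have hle : t.foldl min a ≤ a := (PySem.List.foldl_min_le t a).1
    have hfold : (a :: t).foldl min a = t.foldl min a := by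
      simp [List.foldl]
    by_cases h : t.foldl min a < a
    · rw [if_pos (by rw [hfold]; omega)]
      show (0 : Int) + ((PySem.List.index? (a :: t) ((a :: t).foldl min a)).getD 0 : Int)
          = ((PySem.List.index? (a :: t) (t.foldl min a)).getD 0 : Nat)
      rw [hfold]
      omega
    · have heq : t.foldl min a = a := by omega
      rw [if_neg (by rw [hfold]; omega)]
      show (0 : Int) = ((PySem.List.index? (a :: t) (t.foldl min a)).getD 0 : Nat)
      rw [heq, PySem.List.index?_cons_self]
      rfl
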